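-- pv_equiv track=rewrite | github.com/foolishzhao/leetcode | python3/1900/_1954_Minimum_Garden_Perimeter_to_Collect_Enough_Apples/main.py | minimumPerimeter2
-- ===== SOURCE A (Python) =====
-- def minimumPerimeter2(neededApples: int) -> int:
--     # Num apples per quadrant: (x + 3) * x // 2 + (x + 5) * x // 2 + ... + (x + 2x + 1) * x // 2 = x^3 + x^2
--     # Num apples on per x & y axes: x * (x + 1) // 2
--     def count(x):
--         return (x ** 3 + x ** 2) * 4 + (x * (x + 1) // 2) * 4
--
--     lo, hi = 1, 1000000
--     while lo <= hi:
--         mi = (lo + hi) // 2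
--         if count(mi) >= neededApples:
--             if mi == lo or count(mi - 1) < neededApples:
--                 return mi * 8
--             hi = mi - 1
--         else:
--             lo = mi + 1
--
--     return lo * 8
-- ===== SOURCE B (Python) =====
-- def minimumPerimeter2(neededApples: int) -> int:
--     # B: linear scan upward for the smallest side x with count(x) >= neededApples
--     # (no binary search; at most ~813 iterations for any 32-bit neededApples).
--     def count(x):
--         return (x ** 3 + x ** 2) * 4 + (x * (x + 1) // 2) * 4
--
--     x = 1
--     while count(x) < neededApples:
--         x += 1
--     return x * 8
-- ===== Notes on version B (the rewrite author's own statement) =====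
-- stated objective: simpler
-- what changed: Replaces the binary search over [1,10^6] with a plain linear scan from x=1 for the first x with count(x) >= neededApples.
import Mathlib
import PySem

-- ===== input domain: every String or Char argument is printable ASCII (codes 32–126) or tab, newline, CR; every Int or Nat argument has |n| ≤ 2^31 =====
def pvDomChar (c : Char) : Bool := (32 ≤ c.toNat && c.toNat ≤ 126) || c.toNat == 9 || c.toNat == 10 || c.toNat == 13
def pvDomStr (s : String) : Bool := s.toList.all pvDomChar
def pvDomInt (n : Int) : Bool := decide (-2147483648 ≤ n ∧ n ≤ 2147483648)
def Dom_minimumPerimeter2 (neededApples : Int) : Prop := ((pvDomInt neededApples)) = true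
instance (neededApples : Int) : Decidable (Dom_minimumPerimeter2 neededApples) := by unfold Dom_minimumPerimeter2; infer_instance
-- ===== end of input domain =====

-- A binary-searches [1,10^6] for the least side x with count(x) ≥ neededApples; B finds the same x
-- by a plain linear scan from 1 (simpler; bounded since |neededApples| ≤ 2^31).


-- ===== PORT A =====
-- count(x), shared formula of both Python versions
def pvCount (x : Int) : Int := (x ^ 3 + x ^ 2) * 4 + PySem.Int.floordiv (x * (x + 1)) 2 * 4

-- the while-loop of A: binary search on [lo, hi]
def pvALoop (n lo hi : Int) : Int :=
  if _h : lo ≤ hi then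
    let mi := PySem.Int.floordiv (lo + hi) 2
    if pvCount mi ≥ n then
      if mi = lo ∨ pvCount (mi - 1) < n then mi * 8
      else pvALoop n lo (mi - 1)
    else pvALoop n (mi + 1) hi
  else lo * 8
termination_by (hi - lo + 1).toNat
decreasing_by
  · have := PySem.Int.floordiv_two_mid_bounds _h; omega
  · have := PySem.Int.floordiv_two_mid_bounds _h; omega

def minimumPerimeter2 (neededApples : Int) : Int := pvALoop neededApples 1 1000000

-- ===== PORT B =====
-- closed form used only for termination of the scan
theorem pvCount_ge_self {x : Int} (hx : 1 ≤ x) : x ≤ pvCount x := by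
  obtain ⟨k, hk⟩ := Int.even_mul_succ_self x
  have h2 : PySem.Int.floordiv (x * (x + 1)) 2 = k := by
    rw [PySem.Int.floordiv_eq_ediv_of_pos (by omega : (0:Int) < 2)]; omega
  unfold pvCount
  rw [h2]
  nlinarith

-- the while-loop of B: linear scan from x upward
def pvBLoop (n x : Int) (hx : 1 ≤ x) : Int :=
  if h : pvCount x < n then pvBLoop n (x + 1) (by omega) else x * 8
termination_by (n - x).toNat
decreasing_by
  have := pvCount_ge_self hx; omega

def minimumPerimeter2_alt (neededApples : Int) : Int := pvBLoop neededApples 1 (by omega)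

-- ===== PRECONDITION & SPEC =====
def Spec_minimumPerimeter2 (neededApples : Int) (out : Int) : Prop := out = minimumPerimeter2_alt neededApples
instance (neededApples : Int) (out : Int) : Decidable (Spec_minimumPerimeter2 neededApples out) := by unfold Spec_minimumPerimeter2; infer_instance

-- ===== CLAIM (what is proved, stated in full; the proofs are below) =====
def Claim_equal_minimumPerimeter2 : Prop := ∀ (neededApples : Int), Dom_minimumPerimeter2 neededApples → Spec_minimumPerimeter2 neededApples (minimumPerimeter2 neededApples)

-- ===== LEMMAS AND PROOFS =====

-- closed form of count
theorem pvCount_eq (x : Int) : pvCount x = 4 * x ^ 3 + 6 * x ^ 2 + 2 * x := by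
  obtain ⟨k, hk⟩ := Int.even_mul_succ_self x
  have h2 : PySem.Int.floordiv (x * (x + 1)) 2 = k := by
    rw [PySem.Int.floordiv_eq_ediv_of_pos (by omega : (0:Int) < 2)]; omega
  unfold pvCount; rw [h2]; nlinarith

-- monotone on [1, ∞)
theorem pvCount_mono {a b : Int} (ha : 1 ≤ a) (hab : a ≤ b) : pvCount a ≤ pvCount b := by
  rw [pvCount_eq, pvCount_eq]
  nlinarith [mul_nonneg (mul_nonneg (by omega : (0:Int) ≤ b - a) (by omega : (0:Int) ≤ a)) (by omega : (0:Int) ≤ b),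
    mul_nonneg (by omega : (0:Int) ≤ b - a) (by omega : (0:Int) ≤ a + b),
    sq_nonneg a, sq_nonneg b]

-- "m is the least x ≥ 1 with count x ≥ n"
def pvMin (n m : Int) : Prop := 1 ≤ m ∧ n ≤ pvCount m ∧ ∀ y, 1 ≤ y → y < m → pvCount y < n

theorem pvBLoop_eq {n m : Int} (hm : pvMin n m) :
    ∀ x (hx : 1 ≤ x), x ≤ m → pvBLoop n x hx = m * 8 := by
  obtain ⟨hm1, hmc, hmin⟩ := hm
  have key : ∀ j : Nat, ∀ x (hx : 1 ≤ x), x ≤ m → (m - x).toNat = j → pvBLoop n x hx = m * 8 := by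
    intro j
    induction j with
    | zero =>
      intro x hx hxm hj
      have hxe : x = m := by omega
      subst hxe
      rw [pvBLoop]
      simp [not_lt.mpr hmc]
    | succ j ih =>
      intro x hx hxm hj
      rw [pvBLoop]
      by_cases h : pvCount x < n
      · rw [dif_pos h]
        exact ih (x + 1) (by omega) (by omega) (by omega)
      · rw [dif_neg h]
        have hxe : x = m := by
          by_contra hc
          exact absurd (hmin x hx (by omega)) h
        rw [hxe]
  intro x hx hxm
  exact key (m - x).toNat x hx hxm rfl

theorem pvALoop_eq {n m : Int} (hm : pvMin n m) :
    ∀ lo hi, 1 ≤ lo → lo ≤ m → m ≤ hi → pvALoop n lo hi = m * 8 := by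
  obtain ⟨hm1, hmc, hmin⟩ := hm
  intro lo hi
  induction lo, hi using pvALoop.induct n with
  | case1 lo hi hlh mi hge hret =>
    intro h1 hlm hmh
    have hb := PySem.Int.floordiv_two_mid_bounds hlh
    have hmle : m ≤ mi := by
      by_contra hc
      exact absurd hge (not_le.mpr (hmin mi (by omega) (by omega)))
    have hmi : mi = m := by
      rcases hret with h | h
      · omega
      · by_contra hc
        have : pvCount m ≤ pvCount (mi - 1) := pvCount_mono hm1 (by omega)
        omega
    rw [pvALoop, dif_pos hlh]
    show (if pvCount mi ≥ n then
            if mi = lo ∨ pvCount (mi - 1) < n then mi * 8 else pvALoop n lo (mi - 1)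
          else pvALoop n (mi + 1) hi) = m * 8
    rw [if_pos hge, if_pos hret, hmi]
  | case2 lo hi hlh mi hge hret ih =>
    intro h1 hlm hmh
    have hb := PySem.Int.floordiv_two_mid_bounds hlh
    have hmle : m ≤ mi := by
      by_contra hc
      exact absurd hge (not_le.mpr (hmin mi (by omega) (by omega)))
    have hne : ¬(mi = lo) ∧ n ≤ pvCount (mi - 1) := by
      constructor
      · intro h; exact hret (Or.inl h)
      · by_contra h; exact hret (Or.inr (by omega))
    have hmle' : m ≤ mi - 1 := by
      by_contra hc
      exact absurd hne.2 (not_le.mpr (hmin (mi - 1) (by omega) (by omega)))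
    rw [pvALoop, dif_pos hlh]
    show (if pvCount mi ≥ n then
            if mi = lo ∨ pvCount (mi - 1) < n then mi * 8 else pvALoop n lo (mi - 1)
          else pvALoop n (mi + 1) hi) = m * 8
    rw [if_pos hge, if_neg hret]
    exact ih h1 hlm hmle'
  | case3 lo hi hlh mi hlt ih =>
    intro h1 hlm hmh
    have hb := PySem.Int.floordiv_two_mid_bounds hlh
    have hmi : mi < m := by
      by_contra hc
      have : pvCount m ≤ pvCount mi := pvCount_mono hm1 (by omega)
      have : n ≤ pvCount mi := le_trans hmc this
      exact hlt (by omega)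
    rw [pvALoop, dif_pos hlh]
    show (if pvCount mi ≥ n then
            if mi = lo ∨ pvCount (mi - 1) < n then mi * 8 else pvALoop n lo (mi - 1)
          else pvALoop n (mi + 1) hi) = m * 8
    rw [if_neg hlt]
    exact ih (by omega) (by omega) hmh
  | case4 lo hi hlh =>
    intro h1 hlm hmh
    exact absurd (le_trans hlm hmh) hlh

-- for every 32-bit n the least such m exists and lies in [1, 10^6]
theorem pvMin_exists {n : Int} (hn : n ≤ 2147483648) : ∃ m, pvMin n m ∧ m ≤ 1000000 := by
  classical
  have hex : ∃ k : Nat, n ≤ pvCount ((k : Int) + 1) := by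
    refine ⟨813, ?_⟩
    rw [pvCount_eq]; norm_num; omega
  refine ⟨(Nat.find hex : Int) + 1, ⟨by omega, Nat.find_spec hex, ?_⟩, ?_⟩
  · intro y hy1 hyk
    have hj : (y - 1).toNat < Nat.find hex := by omega
    have hmin := Nat.find_min hex hj
    have hcast : (((y - 1).toNat : Nat) : Int) + 1 = y := by omega
    rw [hcast] at hmin
    omega
  · have : Nat.find hex ≤ 813 := Nat.find_min' hex (by rw [pvCount_eq]; norm_num; omega)
    omega

-- ===== VERDICT (by name: the statement is the Claim_ definition above) =====
theorem minimumPerimeter2_spec : Claim_equal_minimumPerimeter2 := by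
  intro n hdom
  have hn : n ≤ 2147483648 := by
    simp [Dom_minimumPerimeter2, pvDomInt] at hdom; omega
  obtain ⟨m, hm, hmle⟩ := pvMin_exists hn
  unfold Spec_minimumPerimeter2 minimumPerimeter2 minimumPerimeter2_alt
  rw [pvALoop_eq hm 1 1000000 (by omega) hm.1 hmle, pvBLoop_eq hm 1 (by omega) hm.1]
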